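-- pv_equiv track=rewrite | github.com/Alvarotkcrq237/Alvaro-Alejandro-Bustamante-Aliaga-examenes | Examen_final/Ejercicio1_modulos.py | parmayor
-- ===== SOURCE A (Python) =====
-- def parmayor(lis2):
--     pares = []
--     for num in lis2:
--         if num % 2 == 0:
--             pares.append(num)
--     if pares:
--         return max(pares)
--     else:
--         return 0
-- ===== SOURCE B (Python) =====
-- def parmayor(lis2):
--     best = None
--     for num in lis2:
--         if num % 2 == 0 and (best is None or num > best):
--             best = num
--     return best if best is not None else 0
-- ===== Notes on version B (the rewrite author's own statement) =====
-- stated objective: simpler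
-- what changed: B replaces the filter-into-a-list-then-max two-pass with a single pass keeping a running maximum-even accumulator, building no intermediate list.
import Mathlib
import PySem

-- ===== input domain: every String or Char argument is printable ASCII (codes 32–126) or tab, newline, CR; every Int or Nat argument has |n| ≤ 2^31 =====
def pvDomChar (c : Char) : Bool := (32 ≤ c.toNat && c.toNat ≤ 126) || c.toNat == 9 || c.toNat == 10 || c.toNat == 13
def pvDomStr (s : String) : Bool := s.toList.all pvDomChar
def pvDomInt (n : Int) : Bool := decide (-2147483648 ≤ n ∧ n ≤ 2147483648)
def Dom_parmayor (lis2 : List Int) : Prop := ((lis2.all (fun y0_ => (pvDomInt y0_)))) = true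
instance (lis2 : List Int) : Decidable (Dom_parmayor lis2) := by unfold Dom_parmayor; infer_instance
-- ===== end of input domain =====

-- B makes one pass with a running maximum-even accumulator instead of filtering into a list and calling max; return values agree everywhere.
-- ===== PORT A =====
def parmayor (lis2 : List Int) : Int :=
  let pares : List Int := lis2.foldl (fun pares num => if PySem.Int.mod num 2 == 0 then pares ++ [num] else pares) []
  if pares ≠ [] then
    match PySem.List.max? pares (fun x => x) with
    | some m => m
    | none => 0
  else 0

-- ===== PORT B =====
def parmayor_alt (lis2 : List Int) : Int :=
  let best : Option Int := lis2.foldl (fun best num =>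
    if PySem.Int.mod num 2 == 0 && (best.isNone || decide (num > best.getD 0)) then some num else best) none
  match best with
  | some b => b
  | none => 0

-- ===== PRECONDITION & SPEC =====
def Spec_parmayor (lis2 : List Int) (out : Int) : Prop := out = parmayor_alt lis2
instance (lis2 : List Int) (out : Int) : Decidable (Spec_parmayor lis2 out) := by unfold Spec_parmayor; infer_instance

-- ===== CLAIM (what is proved, stated in full; the proofs are below) =====
def Claim_equal_parmayor : Prop := ∀ (lis2 : List Int), Dom_parmayor lis2 → Spec_parmayor lis2 (parmayor lis2)

-- ===== LEMMAS AND PROOFS =====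
-- optMax acc = the value A's final max computes on the accumulated list of evens
def optMax : List Int → Option Int
  | [] => none
  | x :: t => some (t.foldl max x)

lemma optMax_append (acc : List Int) (n : Int) :
    optMax (acc ++ [n]) = some (match optMax acc with | none => n | some m => max m n) := by
  cases acc with
  | nil => simp [optMax]
  | cons x t => simp [optMax, List.foldl_append]

-- loop invariant: B's fold from s simulates A's accumulation when s = optMax acc
lemma fold_inv (l : List Int) : ∀ (acc : List Int),
    l.foldl (fun best num =>
      if PySem.Int.mod num 2 == 0 && (best.isNone || decide (num > best.getD 0)) then some num else best)
      (optMax acc)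
    = optMax (l.foldl (fun pares num => if PySem.Int.mod num 2 == 0 then pares ++ [num] else pares) acc) := by
  induction l with
  | nil => intro acc; rfl
  | cons num t ih =>
    intro acc
    by_cases he : PySem.Int.mod num 2 == 0
    · have h1 : (optMax (acc ++ [num])) = some (match optMax acc with | none => num | some m => max m num) :=
        optMax_append acc num
      simp only [List.foldl_cons, he, Bool.true_and, if_true]
      rw [← ih (acc ++ [num])]
      congr 1
      cases h : optMax acc with
      | none => simp [h1, h]
      | some m =>
        simp only [h1, h, Option.isNone_some, Option.getD_some, Bool.true_and, Bool.false_or]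
        by_cases hlt : m < num
        · simp [hlt, max_eq_right (le_of_lt hlt)]
        · simp [hlt, max_eq_left (not_lt.mp hlt)]
    · simp only [List.foldl_cons, Bool.eq_false_iff.mpr he, Bool.false_and, if_false]
      exact ih acc

lemma max?_id_optMax (xs : List Int) : PySem.List.max? xs (fun x => x) = optMax xs := by
  cases xs with
  | nil => simp [optMax, PySem.List.max?_eq_none_iff]
  | cons x t => rw [optMax, PySem.List.max?_id_cons]

-- ===== VERDICT (by name: the statement is the Claim_ definition above) =====
theorem parmayor_spec : Claim_equal_parmayor := by
  intro lis2 _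
  unfold Spec_parmayor parmayor parmayor_alt
  have h := fold_inv lis2 []
  simp only [optMax] at h
  rw [h]
  cases hp : lis2.foldl (fun pares num => if PySem.Int.mod num 2 == 0 then pares ++ [num] else pares) [] with
  | nil => simp [optMax]
  | cons x t => simp [max?_id_optMax, optMax]
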